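-- pv_equiv track=rewrite | github.com/Karaite-Jewish-Learning-Center/new_karaite | karaites/sefaria_hebrew.py | break_int_magnitudes
-- ===== SOURCE A (Python) =====
-- import math
--
-- def break_int_magnitudes(n, start=None):
--     """break_int_magnitudes(n, start=None)
--
--     Accepts an integer and an optional integer (multiple of 10) for at what order of
--     magnitude to start breaking apart the integer.  If no option "start" is provided,
--     function will determine the size of the input integer and start that the largest order
--     of magnitude.
--
--     Returns a big-endian list of the various orders of magnitude, by 10s, broken apart.
--
--     >>> break_int_magnitudes(1129, 100)
--     [1100, 20, 9]
--
--     >>> break_int_magnitudes(2130)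
--     [2000, 100, 30, 0]
--
--     >>> break_int_magnitudes(15000)
--     [10000, 5000, 0, 0, 0]
--     """
--
--     if type(n) is not int:
--         raise TypeError("Argument 'n' must be int, {} provided.".format(type(n)))
--
--     # if n == 0:
--     # 	return [0]
--
--     # Set a default for 'start' if none specified
--     if start is not None:
--         if not (start % 10 == 0 or start == 1):
--             raise TypeError("Argument 'start' must be 1 or divisible by 10, {} provided.".format(start))
--     else:
--         start = 10 ** int(math.log10(n))
--
--     if start == 1:
--         return [n]
--     else:
--         return [n // start * start] + break_int_magnitudes(n - n // start * start, start=start // 10)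
-- ===== SOURCE B (Python) =====
-- import math
--
-- def break_int_magnitudes(n, start=None):
--     if type(n) is not int:
--         raise TypeError("Argument 'n' must be int, {} provided.".format(type(n)))
--     if start is not None:
--         if not (start % 10 == 0 or start == 1):
--             raise TypeError("Argument 'start' must be 1 or divisible by 10, {} provided.".format(start))
--     else:
--         start = 10 ** int(math.log10(n))
--     if start == 1:
--         return [n]
--     # positional extraction: each component is read off n directly with mod/div
--     powers = []
--     p = start
--     while p > 1:
--         powers.append(p)
--         p //= 10
--     return [n // start * start] + [n % (p * 10) // p * p for p in powers[1:]] + [n % 10]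
-- ===== Notes on version B (the rewrite author's own statement) =====
-- stated objective: alternative
-- what changed: Replaced A's subtract-and-recurse decomposition with direct positional extraction: B builds the list of powers of 10 once and reads each component straight off n with n % (10p) // p * p, never mutating n.
import Mathlib
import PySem

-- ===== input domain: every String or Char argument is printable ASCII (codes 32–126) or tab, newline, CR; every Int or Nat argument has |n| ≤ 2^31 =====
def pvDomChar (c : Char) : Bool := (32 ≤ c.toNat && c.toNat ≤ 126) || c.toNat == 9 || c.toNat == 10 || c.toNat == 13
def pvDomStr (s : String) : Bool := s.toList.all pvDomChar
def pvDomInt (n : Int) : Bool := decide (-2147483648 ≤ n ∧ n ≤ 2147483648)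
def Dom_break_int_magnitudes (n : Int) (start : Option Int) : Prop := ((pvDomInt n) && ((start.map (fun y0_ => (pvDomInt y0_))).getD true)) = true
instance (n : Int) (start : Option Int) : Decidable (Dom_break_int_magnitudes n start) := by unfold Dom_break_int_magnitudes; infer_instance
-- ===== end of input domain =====

-- B replaces A's subtract-and-recurse decomposition with positional extraction: it builds the
-- list of powers of 10 once and reads each component straight off n with mod/div; objective: alternative.

-- shared helper: Python's `10 ** int(math.log10(n))`.  Exact on 1 ≤ n ≤ 2^31 (the only inputs
-- Pre_ admits with start = none): there int(math.log10(n)) = Nat.log 10 n.toNat.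
def pyDefaultStart (n : Int) : Int := (10 : Int) ^ (Nat.log 10 n.toNat)

-- ===== PORT A =====
-- A's recursion; the `start ≤ 0` guard only makes it total (Python raises ZeroDivisionError /
-- diverges there; such starts are outside Pre_).
def breakRecA (n start : Int) : List Int :=
  if start = 1 then [n]
  else if start ≤ 0 then []
  else (PySem.Int.floordiv n start * start) ::
    breakRecA (n - PySem.Int.floordiv n start * start) (PySem.Int.floordiv start 10)
termination_by start.toNat
decreasing_by
  have h := PySem.Int.floordiv_eq_ediv_of_pos (a := start) (b := 10) (by omega)
  omega

def break_int_magnitudes (n : Int) (start : Option Int) : List Int :=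
  let s := match start with
    | some s => s
    | none => pyDefaultStart n
  breakRecA n s

-- ===== PORT B =====
-- B's `while p > 1` loop collecting the powers of 10 from `start` down.
def powersB (p : Int) : List Int :=
  if 1 < p then p :: powersB (PySem.Int.floordiv p 10) else []
termination_by p.toNat
decreasing_by
  have h := PySem.Int.floordiv_eq_ediv_of_pos (a := p) (b := 10) (by omega)
  omega

def break_int_magnitudes_alt (n : Int) (start : Option Int) : List Int :=
  let s := match start with
    | some s => s
    | none => pyDefaultStart n
  if s = 1 then [n]
  else [PySem.Int.floordiv n s * s] ++
       ((powersB s).drop 1).map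
         (fun p => PySem.Int.floordiv (PySem.Int.mod n (p * 10)) p * p) ++
       [PySem.Int.mod n 10]

-- ===== PRECONDITION & SPEC =====
-- A raises outside Pre_: ValueError (math.log10) when start is None and n ≤ 0; TypeError when a
-- given start is neither 1 nor a multiple of 10; ZeroDivisionError / unbounded recursion when a
-- given start is a multiple of 10 but not a positive power of 10.  So Pre_ admits exactly
-- start = none with n ≥ 1, and start = some s with s a power of 10 (s = 10^(log10 s), covering s = 1).
def Pre_break_int_magnitudes (n : Int) (start : Option Int) : Prop :=
  (match start with
   | none => decide (1 ≤ n)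
   | some s => decide (0 < s) && decide ((10 : Int) ^ (Nat.log 10 s.toNat) = s)) = true

instance (n : Int) (start : Option Int) : Decidable (Pre_break_int_magnitudes n start) := by
  unfold Pre_break_int_magnitudes; infer_instance

def pvWitness_break_int_magnitudes : Int × Option Int := (2130, none)

def Spec_break_int_magnitudes (n : Int) (start : Option Int) (out : List Int) : Prop := out = break_int_magnitudes_alt n start
instance (n : Int) (start : Option Int) (out : List Int) : Decidable (Spec_break_int_magnitudes n start out) := by unfold Spec_break_int_magnitudes; infer_instance

-- ===== CLAIM (what is proved, stated in full; the proofs are below) =====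
def Claim_equal_break_int_magnitudes : Prop := ∀ (n : Int) (start : Option Int), Dom_break_int_magnitudes n start → Pre_break_int_magnitudes n start → Spec_break_int_magnitudes n start (break_int_magnitudes n start)

-- ===== LEMMAS AND PROOFS =====

theorem powersB_pow_succ (k : Nat) :
    powersB ((10 : Int) ^ (k + 1)) = (10 : Int) ^ (k + 1) :: powersB ((10 : Int) ^ k) := by
  rw [powersB]
  have h1 : (1 : Int) < 10 ^ (k + 1) := by
    calc (1 : Int) < 10 := by norm_num
    _ ≤ 10 ^ (k + 1) := by exact le_self_pow₀ (by norm_num) (by omega)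
  have h2 : PySem.Int.floordiv ((10 : Int) ^ (k + 1)) 10 = (10 : Int) ^ k := by
    rw [PySem.Int.floordiv_eq_ediv_of_pos (by norm_num), pow_succ]
    exact Int.mul_ediv_cancel _ (by norm_num)
  rw [if_pos h1, h2]

theorem mem_powersB_pow : ∀ (k : Nat) (p : Int), p ∈ powersB ((10 : Int) ^ k) →
    ∃ j : Nat, 1 ≤ j ∧ j ≤ k ∧ p = (10 : Int) ^ j := by
  intro k
  induction k with
  | zero =>
    intro p hp
    rw [powersB] at hp
    simp at hp
  | succ k ih =>
    intro p hp
    rw [powersB_pow_succ] at hp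
    rcases List.mem_cons.mp hp with h | h
    · exact ⟨k + 1, by omega, by omega, h⟩
    · obtain ⟨j, h1, h2, h3⟩ := ih p h
      exact ⟨j, h1, by omega, h3⟩

theorem sub_floordiv_mul (n b : Int) : n - PySem.Int.floordiv n b * b = PySem.Int.mod n b := by
  have h := PySem.Int.floordiv_mul_add_mod n b
  omega

-- A's recursion on a power of 10 equals B's positional read-off.
theorem breakRecA_pow (k : Nat) : ∀ (n : Int),
    breakRecA n ((10 : Int) ^ (k + 1)) =
    (PySem.Int.floordiv n ((10 : Int) ^ (k + 1)) * (10 : Int) ^ (k + 1)) ::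
      ((powersB ((10 : Int) ^ k)).map
        (fun p => PySem.Int.floordiv (PySem.Int.mod n (p * 10)) p * p) ++
       [PySem.Int.mod n 10]) := by
  induction k with
  | zero =>
    intro n
    have h10 : ((10 : Int) ^ (0 + 1)) = 10 := by norm_num
    rw [h10, breakRecA, if_neg (by norm_num : ¬ (10 : Int) = 1),
        if_neg (by norm_num : ¬ (10 : Int) ≤ 0)]
    have hfd : PySem.Int.floordiv (10 : Int) 10 = 1 := by
      rw [PySem.Int.floordiv_eq_ediv_of_pos (by norm_num)]; decide
    rw [hfd, breakRecA, if_pos rfl]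
    have h2 : powersB ((10 : Int) ^ 0) = [] := by rw [powersB]; norm_num
    rw [h2, sub_floordiv_mul]
    simp
  | succ k ih =>
    intro n
    have hpos : (0 : Int) < 10 ^ (k + 2) := by positivity
    have hne1 : ¬ ((10 : Int) ^ (k + 2)) = 1 := by
      have : (10 : Int) ≤ 10 ^ (k + 2) := le_self_pow₀ (by norm_num) (by omega)
      omega
    have hfd : PySem.Int.floordiv ((10 : Int) ^ (k + 2)) 10 = (10 : Int) ^ (k + 1) := by
      rw [PySem.Int.floordiv_eq_ediv_of_pos (by norm_num), pow_succ]
      exact Int.mul_ediv_cancel _ (by norm_num)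
    have hmm : ∀ (b : Int), 0 < b → b ∣ (10 : Int) ^ (k + 2) →
        PySem.Int.mod (PySem.Int.mod n ((10 : Int) ^ (k + 1) * 10)) b = PySem.Int.mod n b := by
      intro b hb hd
      have hs : ((10 : Int) ^ (k + 1) * 10) = (10 : Int) ^ (k + 2) := by rw [← pow_succ]
      rw [hs, PySem.Int.mod_eq_emod_of_pos (b := (10 : Int) ^ (k + 2)) hpos,
          PySem.Int.mod_eq_emod_of_pos hb, PySem.Int.mod_eq_emod_of_pos hb]
      exact Int.emod_emod_of_dvd n hd
    have hn' : n - PySem.Int.floordiv n ((10 : Int) ^ (k + 2)) * (10 : Int) ^ (k + 2) =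
        PySem.Int.mod n ((10 : Int) ^ (k + 1) * 10) := by
      rw [sub_floordiv_mul, ← pow_succ]
    rw [breakRecA, if_neg hne1, if_neg (by omega : ¬ ((10 : Int) ^ (k + 2)) ≤ 0), hfd, ih,
        powersB_pow_succ, List.map_cons, List.cons_append, hn']
    congr 1
    congr 1
    congr 1
    · apply List.map_congr_left
      intro p hp
      obtain ⟨j, hj1, hj2, rfl⟩ := mem_powersB_pow k p hp
      have hpj : (0 : Int) < 10 ^ j * 10 := by positivity
      have hdvd : ((10 : Int) ^ j * 10) ∣ (10 : Int) ^ (k + 2) := by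
        rw [← pow_succ]; exact pow_dvd_pow 10 (by omega)
      rw [hmm _ hpj hdvd]
    · rw [hmm 10 (by norm_num) (dvd_pow_self 10 (by omega))]

-- both ports agree whenever the effective start is a power of 10
theorem agree_on_pow (k : Nat) (n : Int) :
    breakRecA n ((10 : Int) ^ k) =
      (if ((10 : Int) ^ k) = 1 then [n]
       else [PySem.Int.floordiv n ((10 : Int) ^ k) * (10 : Int) ^ k] ++
            ((powersB ((10 : Int) ^ k)).drop 1).map
              (fun p => PySem.Int.floordiv (PySem.Int.mod n (p * 10)) p * p) ++
            [PySem.Int.mod n 10]) := by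
  cases k with
  | zero => rw [breakRecA]; norm_num
  | succ k =>
    have hne1 : ((10 : Int) ^ (k + 1)) ≠ 1 := by
      have : (10 : Int) ≤ 10 ^ (k + 1) := le_self_pow₀ (by norm_num) (by omega)
      omega
    rw [breakRecA_pow k n, if_neg hne1, powersB_pow_succ]
    simp

-- ===== VERDICT (by name: the statement is the Claim_ definition above) =====
theorem break_int_magnitudes_spec : Claim_equal_break_int_magnitudes := by
  intro n start _ hpre
  unfold Spec_break_int_magnitudes break_int_magnitudes break_int_magnitudes_alt
  cases start with
  | none =>
    simp only [pyDefaultStart]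
    exact agree_on_pow (Nat.log 10 n.toNat) n
  | some s =>
    unfold Pre_break_int_magnitudes at hpre
    simp only [Bool.and_eq_true, decide_eq_true_eq] at hpre
    obtain ⟨-, hs⟩ := hpre
    simp only
    rw [← hs]
    exact agree_on_pow (Nat.log 10 s.toNat) n
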